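-- pv_equiv track=rewrite | github.com/Annie-EXE/Plant-Sensor-Pipeline | Lambda Pipeline/transform.py | get_conditions_shade
-- ===== SOURCE A (Python) =====
-- def check_duplicates(data: list[str]) -> bool:
--     """
--     Check through elements within a list and returns a bool to indicate
--     whether all elements in the list are the same
--
--     Args:
--         data (list[str]): A list containing strings
--
--     Returns:
--         bool: True is all elements are the same else False
--     """
--     check_element = data[0]
--     return all(element.lower() == check_element.lower() for element in data)
--
-- def get_conditions_shade(condition_list: list[str]) -> str:
--     """
--     Extract conditions related to the state of the shade for each plant
--
--     Args:
--         conditions (list[str]): A list of conditions related to the state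
--         of the sun and shade
--
--     Returns:
--         str: A string relating to the state of the shade
--     """
--     if not isinstance(condition_list, list):
--         return "No Information"
--
--     shade_conditions = []
--
--     for condition in condition_list:
--         nested_conditions = [s for s in condition.split(
--             "/") if 'shade' in s.lower()]
--         shade_conditions.extend(nested_conditions)
--
--     if shade_conditions:
--         if len(shade_conditions) == 1:
--             return shade_conditions[0]
--         if check_duplicates(shade_conditions):
--             return shade_conditions[0]
--     return "No Information"
-- ===== SOURCE B (Python) =====
-- def get_conditions_shade(condition_list: list[str]) -> str:
--     """
--     Extract the consistent shade condition from condition strings.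
--
--     Different algorithm: instead of collecting the shade substrings and
--     scanning them for duplicates, track the lexicographic minimum and
--     maximum of their lowercased forms during one streaming pass (plus the
--     first original-cased substring).  All lowercased forms coincide exactly
--     when min == max, so the answer is the remembered first substring iff
--     the two extremes are equal at the end.
--     """
--     if not isinstance(condition_list, list):
--         return "No Information"
--
--     first = None
--     lo = hi = None
--     for condition in condition_list:
--         for s in condition.split("/"):
--             t = s.lower()
--             if 'shade' in t:
--                 if first is None:
--                     first = s
--                     lo = hi = t
--                 else:
--                     if t < lo:
--                         lo = t
--                     if hi < t:
--                         hi = t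
--     if first is not None and lo == hi:
--         return first
--     return "No Information"
-- ===== Notes on version B (the rewrite author's own statement) =====
-- stated objective: alternative
-- what changed: Replaces A's collect-all-shade-substrings-into-a-list then duplicate-scan (len==1 special case plus the check_duplicates helper, which re-lowers every element in a second pass) by a streaming extremes test: one pass keeps only the first original-cased shade substring and the lexicographic min and max of the lowercased ones; the conditions are consistent exactly when min == max, so no intermediate list is built or rescanned.
import Mathlib
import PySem

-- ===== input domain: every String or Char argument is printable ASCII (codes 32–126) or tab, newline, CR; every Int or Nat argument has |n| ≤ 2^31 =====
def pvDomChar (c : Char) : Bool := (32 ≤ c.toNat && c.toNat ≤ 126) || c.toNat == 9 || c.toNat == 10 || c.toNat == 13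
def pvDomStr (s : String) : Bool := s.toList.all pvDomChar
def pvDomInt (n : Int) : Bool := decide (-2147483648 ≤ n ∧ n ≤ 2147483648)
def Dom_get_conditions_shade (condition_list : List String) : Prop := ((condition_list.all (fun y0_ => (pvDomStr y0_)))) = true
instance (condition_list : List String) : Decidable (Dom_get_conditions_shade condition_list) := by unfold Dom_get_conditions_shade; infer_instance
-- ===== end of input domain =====

-- B replaces A's collect-then-duplicate-scan by a streaming min/max-extremes test (all lowercased
-- shade substrings coincide iff their lexicographic minimum equals their maximum); objective: alternative.

-- ===== PORT A =====
-- data[0] is ported as headD "": A only calls this helper on a nonempty list.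
def check_duplicates (data : List String) : Bool :=
  let check_element := data.headD ""
  data.all (fun element => PySem.Str.lower element == PySem.Str.lower check_element)

def get_conditions_shade (condition_list : List String) : String :=
  let shade_conditions := condition_list.foldl
    (fun acc condition =>
      acc ++ (((PySem.Str.split? condition "/").getD []).filter
        (fun s => PySem.Str.isIn "shade" (PySem.Str.lower s)))) []
  if shade_conditions ≠ [] then
    if shade_conditions.length = 1 then shade_conditions.headD ""
    else if check_duplicates shade_conditions then shade_conditions.headD ""
    else "No Information"
  else "No Information"

-- ===== PORT B =====
-- state = none while first is None; some (first, lo, hi) afterwards (the three Python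
-- variables are None exactly together).  String `<` is Lean's lexicographic order on
-- characters, which is Python's string `<` on this domain.
def get_conditions_shade_alt (condition_list : List String) : String :=
  let st := condition_list.foldl
    (fun (st : Option (String × String × String)) condition =>
      ((PySem.Str.split? condition "/").getD []).foldl
        (fun (st : Option (String × String × String)) s =>
          let t := PySem.Str.lower s
          if PySem.Str.isIn "shade" t then
            match st with
            | none => some (s, t, t)
            | some (f, lo, hi) =>
                some (f, if t < lo then t else lo, if hi < t then t else hi)
          else st) st)
    none
  match st with
  | some (f, lo, hi) => if lo == hi then f else "No Information"
  | none => "No Information"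

-- ===== PRECONDITION & SPEC =====
def Spec_get_conditions_shade (condition_list : List String) (out : String) : Prop := out = get_conditions_shade_alt condition_list
instance (condition_list : List String) (out : String) : Decidable (Spec_get_conditions_shade condition_list out) := by unfold Spec_get_conditions_shade; infer_instance

-- ===== CLAIM (what is proved, stated in full; the proofs are below) =====
def Claim_equal_get_conditions_shade : Prop := ∀ (condition_list : List String), Dom_get_conditions_shade condition_list → Spec_get_conditions_shade condition_list (get_conditions_shade condition_list)

-- ===== LEMMAS AND PROOFS =====

-- the shade predicate and the per-condition list of shade substrings
def pvPred (s : String) : Bool := PySem.Str.isIn "shade" (PySem.Str.lower s)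
def pvG (c : String) : List String :=
  ((PySem.Str.split? c "/").getD []).filter pvPred

-- B's fused loop body, once the filter has been pulled out; the ifs are min/max
def pvU (st : Option (String × String × String)) (s : String) :
    Option (String × String × String) :=
  match st with
  | none => some (s, PySem.Str.lower s, PySem.Str.lower s)
  | some (f, lo, hi) =>
      some (f, min lo (PySem.Str.lower s), max hi (PySem.Str.lower s))

lemma pv_ite_min (t lo : String) : (if t < lo then t else lo) = min lo t := by
  rcases lt_trichotomy t lo with h|h|h
  · simp [h, min_def, not_le.mpr h]
  · simp [h]
  · simp [not_lt.mpr h.le, h.le]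

lemma pv_ite_max (t hi : String) : (if hi < t then t else hi) = max hi t := by
  rcases lt_trichotomy hi t with h|h|h
  · simp [h, h.le]
  · simp [h]
  · simp [not_lt.mpr h.le, max_def, not_le.mpr h]

lemma pvU_some (l : List String) (f lo hi : String) :
    l.foldl pvU (some (f, lo, hi))
      = some (f, (l.map PySem.Str.lower).foldl min lo,
                 (l.map PySem.Str.lower).foldl max hi) := by
  induction l generalizing lo hi with
  | nil => rfl
  | cons a t ih => simpa [pvU] using ih (min lo (PySem.Str.lower a)) (max hi (PySem.Str.lower a))

lemma pv_foldl_min_le_init {α : Type} [LinearOrder α] (l : List α) (a : α) :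
    l.foldl min a ≤ a := by
  induction l generalizing a with
  | nil => simp
  | cons b t ih => exact le_trans (ih (min a b)) (min_le_left a b)

lemma pv_init_le_foldl_max {α : Type} [LinearOrder α] (l : List α) (a : α) :
    a ≤ l.foldl max a := by
  induction l generalizing a with
  | nil => simp
  | cons b t ih => exact le_trans (le_max_left a b) (ih (max a b))

lemma pv_foldl_min_eq_max_iff {α : Type} [LinearOrder α] (l : List α) (a : α) :
    l.foldl min a = l.foldl max a ↔ ∀ x ∈ l, x = a := by
  induction l generalizing a with
  | nil => simp
  | cons b t ih =>
    simp only [List.foldl_cons, List.mem_cons, forall_eq_or_imp]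
    constructor
    · intro h
      have h1 : t.foldl min (min a b) ≤ min a b := pv_foldl_min_le_init t (min a b)
      have h2 : max a b ≤ t.foldl max (max a b) := pv_init_le_foldl_max t (max a b)
      rw [h] at h1
      have hmm : max a b ≤ min a b := le_trans h2 h1
      have hba : b = a := le_antisymm
        (le_trans (le_max_right a b) (le_trans hmm (min_le_left a b)))
        (le_trans (le_max_left a b) (le_trans hmm (min_le_right a b)))
      subst hba
      simp only [min_self, max_self] at h
      exact ⟨rfl, ih b |>.mp h⟩
    · rintro ⟨hb, ht⟩
      subst hb
      simp only [min_self, max_self]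
      exact (ih b).mpr ht

-- shared characterisation: both ports, rewritten over L = flatMap pvG
lemma pvA_eq (cl : List String) :
    get_conditions_shade cl =
      (match cl.flatMap pvG with
       | [] => "No Information"
       | h :: t =>
         if t.length = 0 then h
         else if (h :: t).all (fun e => PySem.Str.lower e == PySem.Str.lower h) then h
         else "No Information") := by
  unfold get_conditions_shade
  rw [show (fun (acc : List String) condition =>
        acc ++ (((PySem.Str.split? condition "/").getD []).filter
          (fun s => PySem.Str.isIn "shade" (PySem.Str.lower s))))
      = (fun acc x => acc ++ pvG x) from rfl]
  rw [PySem.List.foldl_append_eq_flatMap pvG cl []]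
  cases h : cl.flatMap pvG with
  | nil => simp
  | cons a t =>
    simp only [List.nil_append, check_duplicates]
    cases t with
    | nil => simp
    | cons b u => simp

lemma pvB_eq (cl : List String) :
    get_conditions_shade_alt cl =
      (match cl.flatMap pvG with
       | [] => "No Information"
       | h :: t =>
         if (t.map PySem.Str.lower).foldl min (PySem.Str.lower h)
            = (t.map PySem.Str.lower).foldl max (PySem.Str.lower h) then h
         else "No Information") := by
  unfold get_conditions_shade_alt
  have hstep : ∀ (st : Option (String × String × String)) (condition : String),
      ((PySem.Str.split? condition "/").getD []).foldl
        (fun (st : Option (String × String × String)) s =>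
          let t := PySem.Str.lower s
          if PySem.Str.isIn "shade" t then
            match st with
            | none => some (s, t, t)
            | some (f, lo, hi) =>
                some (f, if t < lo then t else lo, if hi < t then t else hi)
          else st) st
      = (pvG condition).foldl pvU st := by
    intro st condition
    rw [pvG, List.foldl_filter]
    apply PySem.List.foldl_congr_mem
    intro q s _
    simp only [pvPred, pvU]
    split_ifs with h
    · cases q with
      | none => rfl
      | some p =>
        obtain ⟨f, lo, hi⟩ := p
        show some (f, if PySem.Str.lower s < lo then PySem.Str.lower s else lo,
                      if hi < PySem.Str.lower s then PySem.Str.lower s else hi)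
           = some (f, min lo (PySem.Str.lower s), max hi (PySem.Str.lower s))
        rw [pv_ite_min, pv_ite_max]
    · rfl
  simp only [hstep]
  rw [← List.foldl_flatMap]
  cases h : cl.flatMap pvG with
  | nil => rfl
  | cons a t =>
    rw [List.foldl_cons, show pvU none a = some (a, PySem.Str.lower a, PySem.Str.lower a) from rfl,
        pvU_some]
    simp

-- ===== VERDICT (by name: the statement is the Claim_ definition above) =====
theorem get_conditions_shade_spec : Claim_equal_get_conditions_shade := by
  intro cl _
  unfold Spec_get_conditions_shade
  rw [pvA_eq, pvB_eq]
  cases hL : cl.flatMap pvG with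
  | nil => rfl
  | cons a t =>
    have hiff := pv_foldl_min_eq_max_iff (t.map PySem.Str.lower) (PySem.Str.lower a)
    by_cases h1 : t.length = 0
    · have ht : t = [] := List.length_eq_zero_iff.mp h1
      subst ht
      simp
    · by_cases h2 : (a :: t).all (fun e => PySem.Str.lower e == PySem.Str.lower a) = true
      · have : ∀ x ∈ t.map PySem.Str.lower, x = PySem.Str.lower a := by
          intro x hx
          obtain ⟨e, he, rfl⟩ := List.mem_map.mp hx
          have := (List.all_eq_true.mp h2) e (List.mem_cons_of_mem a he)
          exact eq_of_beq this
        simp [h1, h2, hiff.mpr this]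
      · have : ¬ ∀ x ∈ t.map PySem.Str.lower, x = PySem.Str.lower a := by
          intro hall
          apply h2
          rw [List.all_eq_true]
          rintro e he
          rcases List.mem_cons.mp he with rfl | he'
          · simp
          · exact beq_iff_eq.mpr (hall (PySem.Str.lower e) (List.mem_map_of_mem he'))
        simp [h1, h2, (not_iff_not.mpr hiff).mpr this]
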